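-- pv_equiv track=rewrite | github.com/ScholarArena/Repository | steps/02_mine_evidence_needs/library/skill/skill_check_ablation_coverage_verify_0005/code.py | _truncate_texts
-- ===== SOURCE A (Python) =====
-- def _truncate_texts(texts, max_chars):
--     if not max_chars or max_chars <= 0:
--         return texts
--     output = []
--     total = 0
--     for text in texts:
--         if total >= max_chars:
--             break
--         remaining = max_chars - total
--         snippet = text[:remaining]
--         output.append(snippet)
--         total += len(snippet)
--     return output
-- ===== SOURCE B (Python) =====
-- def _truncate_texts(texts, max_chars):
--     if not max_chars or max_chars <= 0:
--         return texts
--     # pass 1: prefix sums of full text lengths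
--     cums = []
--     run = 0
--     for t in texts:
--         run += len(t)
--         cums.append(run)
--     # pass 2: binary search for the first index whose cumulative length
--     # reaches the budget (cums is non-decreasing since lengths are >= 0)
--     lo, hi = 0, len(cums)
--     while lo < hi:
--         mid = (lo + hi) // 2
--         if cums[mid] < max_chars:
--             lo = mid + 1
--         else:
--             hi = mid
--     if lo == len(texts):
--         return list(texts)
--     # pass 3: untouched prefix plus one truncated element
--     before = cums[lo - 1] if lo else 0
--     return texts[:lo] + [texts[lo][:max_chars - before]]
-- ===== Notes on version B (the rewrite author's own statement) =====
-- stated objective: alternative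
-- what changed: B works in staged passes: it builds a prefix-sum array of full text lengths, binary-searches it for the first index reaching the budget, and assembles the untouched prefix plus one truncated element, instead of A's single loop that slices every text while accumulating an output list and a running snippet-length total.
import Mathlib
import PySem

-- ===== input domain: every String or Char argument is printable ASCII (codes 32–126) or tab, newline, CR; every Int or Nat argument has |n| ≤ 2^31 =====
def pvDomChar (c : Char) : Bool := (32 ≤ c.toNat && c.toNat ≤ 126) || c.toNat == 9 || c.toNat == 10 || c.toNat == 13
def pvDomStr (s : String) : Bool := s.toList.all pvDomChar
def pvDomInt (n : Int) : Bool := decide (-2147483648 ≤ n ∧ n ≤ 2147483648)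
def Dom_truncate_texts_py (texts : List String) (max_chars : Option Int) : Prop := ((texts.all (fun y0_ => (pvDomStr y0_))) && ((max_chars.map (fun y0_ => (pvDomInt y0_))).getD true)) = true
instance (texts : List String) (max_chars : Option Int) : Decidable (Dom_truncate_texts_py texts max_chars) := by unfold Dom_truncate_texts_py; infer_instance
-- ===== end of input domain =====

-- B replaces A's accumulate-and-slice loop by staged passes: prefix sums of full
-- lengths, a binary search for the cutoff index, then prefix ++ one truncated
-- element (objective: alternative; same asymptotic cost).

-- ===== PORT A =====
-- A's for-loop with break: state = running total of appended snippet lengths.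
def pvLoopA : List String → Int → Int → List String
  | [], _, _ => []
  | t :: ts, m, total =>
    if total ≥ m then []
    else
      let snippet := PySem.Str.slice t none (some (m - total))
      snippet :: pvLoopA ts m (total + PySem.Str.len snippet)

def truncate_texts_py (texts : List String) (max_chars : Option Int) : List String :=
  match max_chars with
  | none => texts
  | some m => if m ≤ 0 then texts else pvLoopA texts m 0

-- ===== PORT B =====
-- pass 1 of Source B: the prefix-sum list built with a running total `run`.
def pvPrefixSums : List String → Int → List Int
  | [], _ => []
  | t :: ts, run => (run + PySem.Str.len t) :: pvPrefixSums ts (run + PySem.Str.len t)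

-- pass 2 of Source B: the while-loop binary search (mid is always < hi ≤ length,
-- so Python's in-range cums[mid] is ported as getD with an unreachable default).
def pvBsearch (cums : List Int) (m : Int) (lo hi : Nat) : Nat :=
  if lo < hi then
    let mid := (lo + hi) / 2
    if cums.getD mid 0 < m then pvBsearch cums m (mid + 1) hi
    else pvBsearch cums m lo mid
  else lo
termination_by hi - lo
decreasing_by all_goals omega

def truncate_texts_py_alt (texts : List String) (max_chars : Option Int) : List String :=
  match max_chars with
  | none => texts
  | some m =>
    if m ≤ 0 then texts
    else
      let cums := pvPrefixSums texts 0
      let lo := pvBsearch cums m 0 cums.length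
      if lo = texts.length then texts
      else
        -- pass 3 of Source B: texts[:lo] + [texts[lo][:m - before]] (lo is in range)
        texts.take lo ++
          [PySem.Str.slice (texts.getD lo "") none
            (some (m - (if lo = 0 then 0 else cums.getD (lo - 1) 0)))]

-- ===== PRECONDITION & SPEC =====
def Spec_truncate_texts_py (texts : List String) (max_chars : Option Int) (out : List String) : Prop := out = truncate_texts_py_alt texts max_chars
instance (texts : List String) (max_chars : Option Int) (out : List String) : Decidable (Spec_truncate_texts_py texts max_chars out) := by unfold Spec_truncate_texts_py; infer_instance

-- ===== CLAIM (what is proved, stated in full; the proofs are below) =====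
def Claim_equal_truncate_texts_py : Prop := ∀ (texts : List String) (max_chars : Option Int), Dom_truncate_texts_py texts max_chars → Spec_truncate_texts_py texts max_chars (truncate_texts_py texts max_chars)

-- ===== LEMMAS AND PROOFS =====

-- proof-only intermediate: a single linear scan over cumulative full lengths,
-- bridging A's loop and B's staged computation
def pvScanB : List String → Int → Int → List String
  | [], _, _ => []
  | t :: ts, m, cumBefore =>
    let cum := cumBefore + PySem.Str.len t
    if cum ≥ m then [PySem.Str.slice t none (some (m - cumBefore))]
    else t :: pvScanB ts m cum

-- s[:r] is all of s when r ≥ len(s)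
theorem pv_slice_full (t : String) (r : Int) (h : PySem.Str.len t ≤ r) :
    PySem.Str.slice t none (some r) = t := by
  have h0 : (0:Int) ≤ r := le_trans (by simp [PySem.Str.len_eq]) h
  simp only [PySem.Str.slice, PySem.Chars.slice_eq_listSlice, PySem.List.slice_to _ h0]
  rw [List.take_of_length_le, String.ofList_toList]
  have := PySem.Str.len_eq t
  omega

-- length of s[:r] is r when 0 ≤ r ≤ len(s)
theorem pv_len_slice (t : String) (r : Int) (h0 : 0 ≤ r) (h : r ≤ PySem.Str.len t) :
    PySem.Str.len (PySem.Str.slice t none (some r)) = r := by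
  simp only [PySem.Str.len_eq, PySem.Str.toList_slice, PySem.Chars.slice_eq_listSlice,
    PySem.List.slice_to _ h0, List.length_take]
  have := PySem.Str.len_eq t
  omega

theorem pvLoopA_stop (ts : List String) (m total : Int) (h : m ≤ total) :
    pvLoopA ts m total = [] := by
  cases ts with
  | nil => rfl
  | cons t ts => simp [pvLoopA, show total ≥ m from h]

theorem pvLoopA_eq_pvScanB (ts : List String) (m : Int) :
    ∀ total, total < m → pvLoopA ts m total = pvScanB ts m total := by
  induction ts with
  | nil => intro total _; rfl
  | cons t ts ih =>
    intro total hlt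
    have hlen : (0:Int) ≤ PySem.Str.len t := by simp [PySem.Str.len_eq]
    simp only [pvLoopA, pvScanB, if_neg (not_le.mpr hlt)]
    by_cases hcum : total + PySem.Str.len t ≥ m
    · have hsl : PySem.Str.len (PySem.Str.slice t none (some (m - total))) = m - total :=
        pv_len_slice t (m - total) (by omega) (by omega)
      rw [if_pos hcum, hsl]
      rw [pvLoopA_stop ts m (total + (m - total)) (by omega)]
    · have hfull : PySem.Str.slice t none (some (m - total)) = t :=
        pv_slice_full t (m - total) (by omega)
      rw [if_neg hcum, hfull]
      rw [ih (total + PySem.Str.len t) (by omega)]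

theorem pvPrefixSums_length (ts : List String) (r : Int) :
    (pvPrefixSums ts r).length = ts.length := by
  induction ts generalizing r with
  | nil => rfl
  | cons t ts ih => simp [pvPrefixSums, ih]

theorem pvPrefixSums_start_le (ts : List String) (r : Int) (i : Nat) (h : i < ts.length) :
    r ≤ (pvPrefixSums ts r).getD i 0 := by
  induction ts generalizing r i with
  | nil => simp at h
  | cons t ts ih =>
    have hlen : (0:Int) ≤ PySem.Str.len t := by simp [PySem.Str.len_eq]
    cases i with
    | zero =>
      simp only [pvPrefixSums, List.getD_cons_zero]
      have := PySem.Str.len_eq t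
      omega
    | succ i =>
      simp only [pvPrefixSums, List.getD_cons_succ]
      have := ih (r + PySem.Str.len t) i (by simpa using Nat.lt_of_succ_lt_succ h)
      omega

theorem pvPrefixSums_mono (ts : List String) (r : Int) (i j : Nat)
    (hij : i ≤ j) (hj : j < ts.length) :
    (pvPrefixSums ts r).getD i 0 ≤ (pvPrefixSums ts r).getD j 0 := by
  induction ts generalizing r i j with
  | nil => simp at hj
  | cons t ts ih =>
    cases i with
    | zero =>
      cases j with
      | zero => exact le_refl _
      | succ j =>
        simp only [pvPrefixSums, List.getD_cons_zero, List.getD_cons_succ]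
        exact pvPrefixSums_start_le ts (r + PySem.Str.len t) j
          (by simpa using Nat.lt_of_succ_lt_succ hj)
    | succ i =>
      cases j with
      | zero => omega
      | succ j =>
        simp only [pvPrefixSums, List.getD_cons_succ]
        exact ih (r + PySem.Str.len t) i j (Nat.le_of_succ_le_succ hij)
          (by simpa using Nat.lt_of_succ_lt_succ hj)

-- binary-search correctness: the result is the least index whose entry reaches m
theorem pvBsearch_correct (cums : List Int) (m : Int)
    (mono : ∀ i j, i ≤ j → j < cums.length → cums.getD i 0 ≤ cums.getD j 0) :
    ∀ lo hi, lo ≤ hi → hi ≤ cums.length →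
      (∀ i, i < lo → cums.getD i 0 < m) →
      (∀ i, hi ≤ i → i < cums.length → m ≤ cums.getD i 0) →
      pvBsearch cums m lo hi ≤ cums.length ∧
      (∀ i, i < pvBsearch cums m lo hi → cums.getD i 0 < m) ∧
      (pvBsearch cums m lo hi < cums.length → m ≤ cums.getD (pvBsearch cums m lo hi) 0) := by
  intro lo hi
  induction lo, hi using pvBsearch.induct cums m with
  | case1 lo hi hlt mid hmid ih =>
    intro _ hhi hlo hhiP
    rw [pvBsearch, if_pos hlt]
    simp only [show mid = (lo + hi) / 2 from rfl] at *
    rw [if_pos hmid]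
    refine ih (by omega) hhi ?_ hhiP
    intro i hi'
    calc cums.getD i 0 ≤ cums.getD ((lo + hi) / 2) 0 :=
          mono i _ (by omega) (by omega)
      _ < m := hmid
  | case2 lo hi hlt mid hmid ih =>
    intro _ _ hlo hhiP
    rw [pvBsearch, if_pos hlt]
    simp only [show mid = (lo + hi) / 2 from rfl] at *
    rw [if_neg hmid]
    refine ih (by omega) (by omega) hlo ?_
    intro i hmi hil
    calc m ≤ cums.getD ((lo + hi) / 2) 0 := by omega
      _ ≤ cums.getD i 0 := mono _ i hmi hil
  | case3 lo hi hnlt =>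
    intro hle hhi hlo hhiP
    rw [pvBsearch, if_neg hnlt]
    refine ⟨by omega, hlo, fun h => hhiP lo (by omega) h⟩

-- the linear scan equals the staged prefix++truncated-element form, given the
-- characterisation of the cutoff index j
theorem pvScanB_eq_staged (ts : List String) (m : Int) :
    ∀ (c0 : Int) (j : Nat), c0 < m → j ≤ ts.length →
      (∀ i, i < j → (pvPrefixSums ts c0).getD i 0 < m) →
      (j < ts.length → m ≤ (pvPrefixSums ts c0).getD j 0) →
      pvScanB ts m c0 =
        (if j = ts.length then ts
         else ts.take j ++
           [PySem.Str.slice (ts.getD j "") none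
             (some (m - (if j = 0 then c0 else (pvPrefixSums ts c0).getD (j - 1) 0)))]) := by
  induction ts with
  | nil =>
    intro c0 j _ hj _ _
    simp at hj
    simp [pvScanB, hj]
  | cons t ts ih =>
    intro c0 j hc0 hj hlt hge
    by_cases hcum : c0 + PySem.Str.len t ≥ m
    · -- cutoff at index 0
      have hj0 : j = 0 := by
        by_contra h
        have := hlt 0 (by omega)
        simp [pvPrefixSums] at this
        have := PySem.Str.len_eq t
        have : t.toList.length = t.length := by simp
        omega
      subst hj0
      simp only [pvScanB]
      rw [if_pos hcum, if_neg (by simp)]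
      simp
    · -- t fits; recurse
      have hj0 : j ≠ 0 := by
        intro h
        subst h
        have := hge (by simp)
        simp [pvPrefixSums] at this
        have := PySem.Str.len_eq t
        have : t.toList.length = t.length := by simp
        omega
      obtain ⟨j', rfl⟩ : ∃ j', j = j' + 1 := ⟨j - 1, by omega⟩
      have hrec := ih (c0 + PySem.Str.len t) j' (by omega)
        (by simpa using Nat.le_of_succ_le_succ hj)
        (fun i hi => by
          have := hlt (i + 1) (by omega)
          simpa [pvPrefixSums] using this)
        (fun h => by
          have := hge (by simpa using Nat.succ_lt_succ h)
          simpa [pvPrefixSums] using this)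
      simp only [pvScanB, if_neg hcum, hrec]
      by_cases hend : j' = ts.length
      · simp [hend]
      · have hend' : ¬ (j' + 1 = (t :: ts).length) := by simp; omega
        rw [if_neg hend, if_neg hend']
        cases j' with
        | zero => simp [pvPrefixSums]
        | succ k => simp [pvPrefixSums, List.take_succ_cons]

-- ===== VERDICT (by name: the statement is the Claim_ definition above) =====
theorem truncate_texts_py_spec : Claim_equal_truncate_texts_py := by
  intro texts max_chars _
  unfold Spec_truncate_texts_py truncate_texts_py truncate_texts_py_alt
  cases max_chars with
  | none => rfl
  | some m =>
    by_cases hm : m ≤ 0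
    · simp [hm]
    · simp only [if_neg hm]
      have hlenEq := pvPrefixSums_length texts 0
      have mono : ∀ i j, i ≤ j → j < (pvPrefixSums texts 0).length →
          (pvPrefixSums texts 0).getD i 0 ≤ (pvPrefixSums texts 0).getD j 0 :=
        fun i j hij hj => pvPrefixSums_mono texts 0 i j hij (hlenEq ▸ hj)
      have hb := pvBsearch_correct (pvPrefixSums texts 0) m mono 0
        (pvPrefixSums texts 0).length (Nat.zero_le _) (le_refl _)
        (by omega) (by omega)
      set j := pvBsearch (pvPrefixSums texts 0) m 0 (pvPrefixSums texts 0).length with hjdef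
      rw [pvLoopA_eq_pvScanB texts m 0 (by omega)]
      rw [pvScanB_eq_staged texts m 0 j (by omega) (by omega)
        hb.2.1 (fun h => hb.2.2 (by omega))]
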